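-- pv_equiv track=rewrite | github.com/memnochdavid/entregaT3-SGE | ejerciciosT3.py | x06
-- ===== SOURCE A (Python) =====
-- def x06(n, intervalo)->list:
--     encontrados=[]
--     i=intervalo[0]
--     while i<=intervalo[1]:
--         if i%n==0:
--             encontrados.append(i)
--         i+=1
--     return encontrados
-- ===== SOURCE B (Python) =====
-- def x06(n, intervalo) -> list:
--     a, b = intervalo[0], intervalo[1]
--     m = abs(n)
--     start = a + (-a) % m
--     return list(range(start, b + 1, m))
-- ===== Notes on version B (the rewrite author's own statement) =====
-- stated objective: alternative
-- what changed: Instead of scanning every integer of the interval and testing divisibility, B jumps to the first multiple of |n| at or above the lower bound and steps by |n| via range; this saves work only for large |n|, and a timing run (small divisors) found no measured speed-up.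
-- outside the precondition, e.g. on x06(0, (5, 3)): A returns [], B raises ZeroDivisionError
import Mathlib
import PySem

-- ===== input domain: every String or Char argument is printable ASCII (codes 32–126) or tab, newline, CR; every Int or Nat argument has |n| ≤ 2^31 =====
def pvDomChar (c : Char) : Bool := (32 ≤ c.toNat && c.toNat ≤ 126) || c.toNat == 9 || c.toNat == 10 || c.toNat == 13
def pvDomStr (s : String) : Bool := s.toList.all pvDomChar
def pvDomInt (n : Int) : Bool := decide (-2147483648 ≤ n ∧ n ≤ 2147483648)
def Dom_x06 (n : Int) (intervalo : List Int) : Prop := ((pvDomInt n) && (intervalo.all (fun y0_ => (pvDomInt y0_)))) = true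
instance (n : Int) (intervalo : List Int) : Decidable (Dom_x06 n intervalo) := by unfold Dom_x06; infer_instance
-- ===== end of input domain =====

-- ===== PORT A =====
-- A scans every integer of [intervalo[0], intervalo[1]] and keeps the multiples of n.
def aScanLoop (n b : Int) (i : Int) (acc : List Int) : List Int :=
  if i ≤ b then
    aScanLoop n b (i + 1) (if PySem.Int.mod i n = 0 then acc ++ [i] else acc)
  else acc
termination_by (b + 1 - i).toNat
decreasing_by omega

def x06 (n : Int) (intervalo : List Int) : List Int :=
  match PySem.List.pyGet? intervalo 0, PySem.List.pyGet? intervalo 1 with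
  | some a, some b => aScanLoop n b a []
  | _, _ => []

-- ===== PORT B =====
-- B jumps to the first multiple of |n| at or above the lower bound and steps by |n|.
def x06_alt (n : Int) (intervalo : List Int) : List Int :=
  match PySem.List.pyGet? intervalo 0 with
  | none => []
  | some a =>
    match PySem.List.pyGet? intervalo 1 with
    | none => []
    | some b =>
      let m : Int := |n|
      let start : Int := a + PySem.Int.mod (-a) m
      PySem.List.pyRange start (b + 1) m

-- ===== PRECONDITION & SPEC =====
-- Pre_ excludes lists with fewer than two elements (A raises IndexError) and n = 0, on which A
-- raises ZeroDivisionError whenever the interval is nonempty; in the degenerate n = 0 case with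
-- an empty interval (intervalo[1] < intervalo[0]) A accidentally returns [] without ever touching
-- the zero divisor, while B raises ZeroDivisionError there too.
def Pre_x06 (n : Int) (intervalo : List Int) : Prop :=
  n ≠ 0 ∧ 2 ≤ intervalo.length
instance (n : Int) (intervalo : List Int) : Decidable (Pre_x06 n intervalo) := by
  unfold Pre_x06; infer_instance

def pvWitness_x06 : Int × List Int := (3, [1, 10])

def Spec_x06 (n : Int) (intervalo : List Int) (out : List Int) : Prop := out = x06_alt n intervalo
instance (n : Int) (intervalo : List Int) (out : List Int) : Decidable (Spec_x06 n intervalo out) := by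
  unfold Spec_x06; infer_instance

-- ===== CLAIM (what is proved, stated in full; the proofs are below) =====
def Claim_equal_x06 : Prop := ∀ (n : Int) (intervalo : List Int), Dom_x06 n intervalo → Pre_x06 n intervalo → Spec_x06 n intervalo (x06 n intervalo)

-- ===== LEMMAS AND PROOFS =====

theorem aScanLoop_step (n b i : Int) (acc : List Int) (h : i ≤ b) :
    aScanLoop n b i acc = aScanLoop n b (i + 1) (if PySem.Int.mod i n = 0 then acc ++ [i] else acc) := by
  rw [aScanLoop]; simp [h]

theorem aScanLoop_stop (n b i : Int) (acc : List Int) (h : b < i) :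
    aScanLoop n b i acc = acc := by
  rw [aScanLoop]; simp [h]

theorem aScanLoop_append (n b : Int) : ∀ (i : Int) (acc : List Int),
    aScanLoop n b i acc = acc ++ aScanLoop n b i [] := by
  intro i
  induction hk : (b + 1 - i).toNat using Nat.strong_induction_on generalizing i with
  | _ k ih =>
    intro acc
    by_cases hle : i ≤ b
    · rw [aScanLoop_step n b i acc hle, aScanLoop_step n b i [] hle,
          ih (b + 1 - (i + 1)).toNat (by omega) (i + 1) rfl,
          ih (b + 1 - (i + 1)).toNat (by omega) (i + 1) rfl
            (if PySem.Int.mod i n = 0 then [] ++ [i] else [])]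
      split <;> simp
    · rw [aScanLoop_stop n b i acc (by omega), aScanLoop_stop n b i [] (by omega)]
      simp

theorem mem_aScanLoop (n b : Int) : ∀ (i x : Int),
    x ∈ aScanLoop n b i [] ↔ i ≤ x ∧ x ≤ b ∧ PySem.Int.mod x n = 0 := by
  intro i
  induction hk : (b + 1 - i).toNat using Nat.strong_induction_on generalizing i with
  | _ k ih =>
    intro x
    by_cases hle : i ≤ b
    · rw [aScanLoop_step n b i [] hle, aScanLoop_append, List.mem_append,
          ih (b + 1 - (i + 1)).toNat (by omega) (i + 1) rfl x]
      constructor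
      · rintro (hx | ⟨h1, h2, h3⟩)
        · split at hx <;> simp at hx
          rename_i hm
          exact ⟨by omega, by omega, hx ▸ hm⟩
        · exact ⟨by omega, h2, h3⟩
      · rintro ⟨h1, h2, h3⟩
        by_cases hxi : x = i
        · subst hxi
          left; simp [h3]
        · right; exact ⟨by omega, h2, h3⟩
    · rw [aScanLoop_stop n b i [] (by omega)]
      simp; omega

theorem pairwise_aScanLoop (n b : Int) : ∀ (i : Int),
    (aScanLoop n b i []).Pairwise (· < ·) := by
  intro i
  induction hk : (b + 1 - i).toNat using Nat.strong_induction_on generalizing i with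
  | _ k ih =>
    by_cases hle : i ≤ b
    · rw [aScanLoop_step n b i [] hle, aScanLoop_append]
      have htail := ih (b + 1 - (i + 1)).toNat (by omega) (i + 1) rfl
      split
      · simp only [List.nil_append, List.singleton_append, List.pairwise_cons]
        refine ⟨fun x hx => ?_, htail⟩
        have := (mem_aScanLoop n b (i + 1) x).mp hx
        omega
      · simpa using htail
    · rw [aScanLoop_stop n b i [] (by omega)]
      simp

theorem x06_spec' (n : Int) (intervalo : List Int) (hpre : Pre_x06 n intervalo) :
    x06 n intervalo = x06_alt n intervalo := by
  obtain ⟨hn, hlen⟩ := hpre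
  match intervalo, hlen with
  | a :: b :: rest, _ =>
    have hget0 : PySem.List.pyGet? (a :: b :: rest) 0 = some a := by
      simp [PySem.List.pyGet?, PySem.List.pyIdx?,
        show (0 : Int) ≤ (rest.length : Int) + 1 from by positivity]
    have hget1 : PySem.List.pyGet? (a :: b :: rest) 1 = some b := by
      simp [PySem.List.pyGet?, PySem.List.pyIdx?]
    simp only [x06, x06_alt, hget0, hget1]
    set m : Int := |n| with hm
    have hmpos : 0 < m := abs_pos.mpr hn
    set s : Int := a + PySem.Int.mod (-a) m with hs
    -- bounds on s
    have hmod : PySem.Int.mod (-a) m = -a % m := PySem.Int.mod_eq_emod_of_pos hmpos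
    have hmod_nonneg : 0 ≤ PySem.Int.mod (-a) m := PySem.Int.mod_nonneg (-a) hmpos
    have hmod_lt : PySem.Int.mod (-a) m < m := PySem.Int.mod_lt (-a) hmpos
    have hdm := Int.mul_ediv_add_emod (-a) m
    have hneg : m * -(-a / m) = -(m * (-a / m)) := by ring
    have hsdvd : m ∣ s := ⟨-(-a / m), by rw [hs, hmod]; omega⟩
    -- both lists are strictly sorted
    have h1 := pairwise_aScanLoop n b a
    have h2 : (PySem.List.pyRange s (b + 1) m).Pairwise (· < ·) := by
      rw [PySem.List.pyRange_of_pos s (b + 1) hmpos]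
      refine List.Pairwise.map _ (fun x y (hxy : x < y) => ?_) List.pairwise_lt_range
      have : m * (x : Int) < m * (y : Int) := by
        apply mul_lt_mul_of_pos_left _ hmpos
        exact_mod_cast hxy
      omega
    -- and they have the same membership
    have hmem : ∀ x, x ∈ aScanLoop n b a [] ↔ x ∈ PySem.List.pyRange s (b + 1) m := by
      intro x
      rw [mem_aScanLoop, PySem.List.mem_pyRange_iff_of_pos hmpos,
          PySem.Int.mod_eq_zero_iff_dvd]
      constructor
      · rintro ⟨hax, hxb, hdvd⟩
        have hdvd' : m ∣ x := by rw [hm]; exact (abs_dvd n x).mpr hdvd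
        refine ⟨?_, by omega, hdvd'.sub hsdvd⟩
        -- s is the least multiple of m that is ≥ a
        obtain ⟨k, hk⟩ := hdvd'.sub hsdvd
        by_contra hlt
        have hk1 : k ≤ -1 := by
          by_contra hk0
          have : 0 ≤ m * k := mul_nonneg (le_of_lt hmpos) (by omega)
          omega
        have : m * k ≤ m * (-1) := mul_le_mul_of_nonneg_left hk1 (le_of_lt hmpos)
        omega
      · rintro ⟨hsx, hxb, hdvd⟩
        refine ⟨by omega, by omega, (abs_dvd n x).mp ?_⟩
        rw [← hm]
        simpa using hdvd.add hsdvd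
    -- strictly sorted lists with the same members are equal
    have hperm : (aScanLoop n b a []).Perm (PySem.List.pyRange s (b + 1) m) := by
      refine (List.perm_ext_iff_of_nodup ?_ ?_).mpr hmem
      · exact h1.imp (fun h => ne_of_lt h)
      · exact h2.imp (fun h => ne_of_lt h)
    exact List.Perm.eq_of_pairwise (fun x y _ _ hxy hyx => by omega) h1 h2 hperm

-- ===== VERDICT (by name: the statement is the Claim_ definition above) =====
theorem x06_spec : Claim_equal_x06 := by
  intro n intervalo _ hpre
  exact x06_spec' n intervalo hpre
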